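-- pv_equiv track=rewrite | github.com/yunalescca/AdventOfCode | 2019/Day 4/day_4b.py | has_exactly_two
-- ===== SOURCE A (Python) =====
-- def has_exactly_two(nr):
--     count = 1
--     for i in range(1, len(nr)):
--         if nr[i] == nr[i - 1]:
--             count +=1
--         else:
--             if count == 2:
--                 return True
--             count = 1
--     return count == 2
-- ===== SOURCE B (Python) =====
-- def has_exactly_two(nr):
--     s = list(nr)
--     prevs = [None] + s
--     nexts = s[2:] + [None]
--     return any(a == b and pa != a and nb != b
--                for a, b, pa, nb in zip(s, s[1:], prevs, nexts))
-- ===== Notes on version B (the rewrite author's own statement) =====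
-- stated objective: alternative
-- what changed: B drops A's mutable run counter and early-return loop; it zips the string with its shifted views (previous/next neighbours, None-padded) and tests each position statelessly for being the start of a maximal run of length exactly two.
import Mathlib
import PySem

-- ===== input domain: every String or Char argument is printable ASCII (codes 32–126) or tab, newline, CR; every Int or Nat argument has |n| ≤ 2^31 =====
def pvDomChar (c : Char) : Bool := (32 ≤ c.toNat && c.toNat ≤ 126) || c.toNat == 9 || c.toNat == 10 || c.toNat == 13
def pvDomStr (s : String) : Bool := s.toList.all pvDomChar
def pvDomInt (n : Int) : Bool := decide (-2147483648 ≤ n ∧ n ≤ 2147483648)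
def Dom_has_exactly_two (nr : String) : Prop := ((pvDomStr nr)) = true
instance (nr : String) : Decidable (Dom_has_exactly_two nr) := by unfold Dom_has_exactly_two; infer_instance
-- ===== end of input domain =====

set_option maxRecDepth 4000


-- B replaces A's stateful counter loop with a stateless test, at each position, of being the
-- start of a maximal run of length exactly two (via zipped shifted views); objective: alternative.

-- ===== PORT A =====
-- loop `for i in range(1, len(nr))` with early return; indices i and i-1 are always in range.
def loopA (l : List Char) (i : Nat) (count : Int) : Bool :=
  if i < l.length then
    if l.getD i ' ' = l.getD (i - 1) ' ' then loopA l (i + 1) (count + 1)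
    else if count = 2 then true
    else loopA l (i + 1) 1
  else count == 2
termination_by l.length - i
decreasing_by all_goals omega

def has_exactly_two (nr : String) : Bool := loopA nr.toList 1 1

-- ===== PORT B =====
-- s, s[1:], [None]+s, s[2:]+[None] zipped; None is modelled by Option Char.
def has_exactly_two_alt (nr : String) : Bool :=
  let s := nr.toList
  let ms := s.map some
  let prevs := none :: ms
  let nexts := (s.drop 2).map some ++ [none]
  ((ms.zip ((s.drop 1).map some)).zip (prevs.zip nexts)).any
    (fun x => x.1.1 == x.1.2 && x.2.1 != x.1.1 && x.2.2 != x.1.2)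

-- ===== PRECONDITION & SPEC =====
def Spec_has_exactly_two (nr : String) (out : Bool) : Prop := out = has_exactly_two_alt nr
instance (nr : String) (out : Bool) : Decidable (Spec_has_exactly_two nr out) := by unfold Spec_has_exactly_two; infer_instance

-- ===== CLAIM (what is proved, stated in full; the proofs are below) =====
def Claim_equal_has_exactly_two : Prop := ∀ (nr : String), Dom_has_exactly_two nr → Spec_has_exactly_two nr (has_exactly_two nr)

-- ===== LEMMAS AND PROOFS =====

-- run lengths of s, given that the current run (char p) already has length `count`
def rlf (p : Char) (count : Int) : List Char → List Int
  | [] => [count]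
  | c :: t => if c = p then rlf c (count + 1) t else count :: rlf c 1 t

-- run lengths of the runs of s that start inside s (the leading run is dropped when it merely
-- continues `prev`)
def trO (prev : Option Char) : List Char → List Int
  | [] => []
  | c :: t => if some c = prev then trO (some c) t else rlf c 1 t

-- A's loop, rephrased structurally over the remaining suffix with the previous char carried along
def scanA (p : Char) (count : Int) : List Char → Bool
  | [] => count == 2
  | c :: t => if c = p then scanA c (count + 1) t
              else if count = 2 then true
              else scanA c 1 t

-- B's zip-any, rephrased structurally with the previous char carried along
def bscan (prev : Option Char) : List Char → Bool
  | a :: b :: u => ((a == b) && (prev != some a) && (u.head? != some b)) || bscan (some a) (b :: u)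
  | _ => false

theorem scanA_eq_rlf (s : List Char) : ∀ p count, scanA p count s = decide (2 ∈ rlf p count s) := by
  induction s with
  | nil =>
      intro p count
      rw [scanA, rlf, Bool.eq_iff_iff]
      simp only [beq_iff_eq, decide_eq_true_eq, List.mem_singleton]
      omega
  | cons c t ih =>
      intro p count
      rw [scanA, rlf]
      by_cases h : c = p
      · rw [if_pos h, if_pos h]; exact ih c (count + 1)
      · rw [if_neg h, if_neg h]
        by_cases h2 : count = 2
        · rw [if_pos h2, Bool.eq_iff_iff]
          simp [h2]
        · rw [if_neg h2, ih, Bool.eq_iff_iff]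
          simp only [decide_eq_true_eq, List.mem_cons]
          constructor
          · exact fun hh => Or.inr hh
          · rintro (hh | hh)
            · omega
            · exact hh

theorem mem2_rlf_big (s : List Char) : ∀ p count, 3 ≤ count →
    (2 ∈ rlf p count s ↔ 2 ∈ trO (some p) s) := by
  induction s with
  | nil => intro p count h; simp [rlf, trO]; omega
  | cons c t ih =>
      intro p count h
      by_cases hc : c = p
      · subst hc
        rw [rlf, if_pos rfl, trO, if_pos rfl]
        exact ih c (count + 1) (by omega)
      · rw [rlf, if_neg hc, trO, if_neg (by simp [hc])]
        simp only [List.mem_cons]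
        constructor
        · rintro (hh | hh)
          · omega
          · exact hh
        · exact fun hh => Or.inr hh

theorem bscan_eq_trO (s : List Char) : ∀ prev, bscan prev s = decide (2 ∈ trO prev s) := by
  induction s with
  | nil => intro prev; simp [bscan, trO]
  | cons a t ih =>
      intro prev
      match t with
      | [] =>
          by_cases h : some a = prev
          · conv_rhs => rw [trO, if_pos h]
            simp [bscan, trO]
          · conv_rhs => rw [trO, if_neg h]
            simp [bscan, rlf]
      | b :: u =>
          by_cases h : some a = prev
          · have hb : bscan prev (a :: b :: u) = bscan (some a) (b :: u) := by
              rw [← h]; simp [bscan]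
            rw [hb, ih (some a)]
            conv_rhs => rw [trO, if_pos h]
          · by_cases hba : b = a
            · subst hba
              rcases u with _ | ⟨c, v⟩
              · conv_rhs => rw [trO, if_neg h]
                rw [Bool.eq_iff_iff]
                simp [bscan, rlf, Ne.symm h]
              · by_cases hcb : c = b
                · subst hcb
                  have hstep : bscan prev (c :: c :: c :: v) = bscan (some c) (c :: c :: v) := by
                    conv_lhs => rw [bscan]
                    simp
                  rw [hstep, ih (some c)]
                  have h1 : trO (some c) (c :: c :: v) = trO (some c) v := by
                    rw [trO, if_pos rfl, trO, if_pos rfl]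
                  have h2 : trO prev (c :: c :: c :: v) = rlf c 3 v := by
                    rw [trO, if_neg h]
                    norm_num [rlf]
                  rw [h1, h2]
                  exact decide_eq_decide.mpr (mem2_rlf_big v c 3 (by omega)).symm
                · conv_rhs => rw [trO, if_neg h]
                  rw [bscan, Bool.eq_iff_iff]
                  simp [bscan, rlf, hcb, Ne.symm h]
            · rw [bscan, ih (some a)]
              conv_rhs => rw [trO, if_neg h]
              rw [Bool.eq_iff_iff]
              simp [trO, rlf, hba, show ¬ (some b = some a) by simp [hba]]
              intro hab _ _
              exact absurd hab.symm hba

theorem loopA_eq_scanA : ∀ (k : Nat) (l : List Char) (i : Nat), l.length - i = k → 1 ≤ i → i ≤ l.length →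
    ∀ count, loopA l i count = scanA (l.getD (i - 1) ' ') count (l.drop i) := by
  intro k
  induction k with
  | zero =>
      intro l i hk h1 h2 count
      have hi : i = l.length := by omega
      rw [loopA]
      simp [hi, List.drop_length, scanA]
  | succ k ih =>
      intro l i hk h1 h2 count
      have hlt : i < l.length := by omega
      have hdrop : l.drop i = l.getD i ' ' :: l.drop (i + 1) := by
        rw [List.getD_eq_getElem l ' ' hlt, List.drop_eq_getElem_cons hlt]
      rw [loopA, if_pos hlt, hdrop]
      have hnext : (i + 1) - 1 = i := by omega
      by_cases he : l.getD i ' ' = l.getD (i - 1) ' '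
      · rw [if_pos he, scanA, if_pos he, ih l (i + 1) (by omega) (by omega) (by omega), hnext]
      · rw [if_neg he, scanA, if_neg he]
        by_cases h2c : count = 2
        · simp [h2c]
        · simp only [h2c, if_false]
          rw [ih l (i + 1) (by omega) (by omega) (by omega), hnext]

-- B's zip-any equals bscan, generalized over the head of the prevs list
theorem zip_eq_bscan (s : List Char) : ∀ prev,
    (((s.map some).zip ((s.drop 1).map some)).zip ((prev :: s.map some).zip ((s.drop 2).map some ++ [none]))).any
      (fun x => x.1.1 == x.1.2 && x.2.1 != x.1.1 && x.2.2 != x.1.2) = bscan prev s := by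
  induction s with
  | nil => intro prev; simp [bscan]
  | cons a t ih =>
      intro prev
      match t with
      | [] => simp [bscan]
      | b :: u =>
          rcases u with _ | ⟨c, v⟩
          · simp [bscan, Bool.or_comm]
          · have ihb := ih (some a)
            simp only [List.map, List.drop, List.zip_cons_cons, List.any_cons, List.cons_append] at *
            rw [ihb]
            simp [bscan, Bool.or_comm, Bool.or_left_comm]

-- ===== VERDICT (by name: the statement is the Claim_ definition above) =====
theorem has_exactly_two_spec : Claim_equal_has_exactly_two := by
  intro nr _
  unfold Spec_has_exactly_two has_exactly_two has_exactly_two_alt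
  rw [zip_eq_bscan nr.toList none, bscan_eq_trO]
  rcases h : nr.toList with _ | ⟨a, t⟩
  · rw [loopA]; simp [trO]
  · have := loopA_eq_scanA t.length (a :: t) 1 (by simp) (by omega) (by simp) 1
    rw [this]
    simp only [List.getD, List.drop]
    rw [scanA_eq_rlf]
    simp [trO]
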